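-- pv_equiv track=rewrite | github.com/brianpacouloute/square_puzzle_algorithm | 8puzzle.py | h3_pattern_database
-- ===== SOURCE A (Python) =====
-- def h3_pattern_database(state):
--     """
--     Pattern Database heuristic by referencing calculated distances for a subset of tiles.
--     Args:
--         state (tuple): The current puzzle state.
--     Returns:
--         heuristic_value (int): A heuristic value based on calculated tile distances.
--     """
--     pattern_goal_positions = {
--         1: (0, 0), 2: (0, 1), 3: (0, 2), 4: (1, 0)
--     }
--     heuristic_value = 0
--     for r in range(3): # Iterate through each row
--         for c in range(3): # Iterate through each column
--             val = state[r][c]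
--             if val in pattern_goal_positions:
--                 goal_r, goal_c = pattern_goal_positions[val]
--                 heuristic_value += abs(goal_r - r) + abs(goal_c - c) # Compute Manhattan distance for subset
--     return heuristic_value
-- ===== SOURCE B (Python) =====
-- def h3_pattern_database(state):
--     # Phase 1: invert the grid into a value -> list-of-positions index.
--     # Phase 2: walk the four pattern goal tiles and sum Manhattan distances
--     # for every occurrence of each goal tile.
--     positions = {}
--     for r in range(3):
--         row = state[r]
--         for c in range(3):
--             positions[row[c]] = positions.get(row[c], []) + [(r, c)]
--     total = 0
--     pattern_goal_positions = {1: (0, 0), 2: (0, 1), 3: (0, 2), 4: (1, 0)}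
--     for val, (goal_r, goal_c) in pattern_goal_positions.items():
--         for (r, c) in positions.get(val, []):
--             total += abs(goal_r - r) + abs(goal_c - c)
--     return total
-- ===== Notes on version B (the rewrite author's own statement) =====
-- stated objective: alternative
-- what changed: B inverts the decomposition: it builds a value-to-positions index of the 3x3 grid in one scan, then iterates over the four pattern goal tiles and sums Manhattan distances for every occurrence, instead of testing each of the nine cells against the goal dict.
import Mathlib
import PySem

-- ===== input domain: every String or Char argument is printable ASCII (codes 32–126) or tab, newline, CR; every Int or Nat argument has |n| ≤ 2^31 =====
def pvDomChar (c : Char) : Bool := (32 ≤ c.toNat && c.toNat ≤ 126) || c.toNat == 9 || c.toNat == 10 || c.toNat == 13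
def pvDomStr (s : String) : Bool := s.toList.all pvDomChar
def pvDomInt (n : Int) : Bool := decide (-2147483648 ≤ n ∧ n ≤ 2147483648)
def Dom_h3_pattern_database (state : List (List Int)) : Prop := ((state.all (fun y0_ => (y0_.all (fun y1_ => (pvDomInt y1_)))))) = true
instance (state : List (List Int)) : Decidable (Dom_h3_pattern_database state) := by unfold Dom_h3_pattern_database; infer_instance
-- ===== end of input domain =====

-- B builds a value→positions index of the 3x3 grid in one scan, then sums Manhattan
-- distances over the four pattern goal tiles (alternative decomposition, same cost).
-- On inputs without a full 3x3 prefix both A and B raise IndexError; those inputs are outside Pre_.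

-- ===== PORT A =====
def h3_pattern_database (state : List (List Int)) : Int :=
  let pattern_goal_positions : PySem.Dict Int (Int × Int) :=
    PySem.Dict.ofList [(1, (0, 0)), (2, (0, 1)), (3, (0, 2)), (4, (1, 0))]
  (PySem.List.pyRange 0 3 1).foldl (fun heuristic_value r =>
    (PySem.List.pyRange 0 3 1).foldl (fun heuristic_value c =>
      -- state[r][c]: indices are in range under Pre_, so pyGetD is exact there
      let val := PySem.List.pyGetD (PySem.List.pyGetD state r []) c 0
      match pattern_goal_positions.get? val with
      | some g => heuristic_value + (|g.1 - r| + |g.2 - c|)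
      | none => heuristic_value) heuristic_value) 0

-- ===== PORT B =====
def h3_pattern_database_alt (state : List (List Int)) : Int :=
  let positions : PySem.Dict Int (List (Int × Int)) :=
    (PySem.List.pyRange 0 3 1).foldl (fun d r =>
      -- row = state[r]: in range under Pre_, so pyGetD is exact there
      let row := PySem.List.pyGetD state r []
      (PySem.List.pyRange 0 3 1).foldl (fun d c =>
        let v := PySem.List.pyGetD row c 0
        d.insert v (d.getD v [] ++ [(r, c)])) d) PySem.Dict.empty
  let pattern_goal_positions : PySem.Dict Int (Int × Int) :=
    PySem.Dict.ofList [(1, (0, 0)), (2, (0, 1)), (3, (0, 2)), (4, (1, 0))]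
  pattern_goal_positions.items.foldl (fun total kv =>
    (positions.getD kv.1 []).foldl (fun total p =>
      total + (|kv.2.1 - p.1| + |kv.2.2 - p.2|)) total) 0

-- ===== PRECONDITION & SPEC =====
-- Pre_: exactly the inputs where A returns (state[r][c] exists for all r,c < 3); elsewhere A raises IndexError.
def Pre_h3_pattern_database (state : List (List Int)) : Prop :=
  3 ≤ state.length ∧ ∀ row ∈ state.take 3, 3 ≤ row.length
instance (state : List (List Int)) : Decidable (Pre_h3_pattern_database state) := by
  unfold Pre_h3_pattern_database; infer_instance
def pvWitness_h3_pattern_database : List (List Int) := [[1, 2, 3], [4, 5, 6], [7, 8, 0]]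

def Spec_h3_pattern_database (state : List (List Int)) (out : Int) : Prop :=
  out = h3_pattern_database_alt state
instance (state : List (List Int)) (out : Int) : Decidable (Spec_h3_pattern_database state out) := by
  unfold Spec_h3_pattern_database; infer_instance

-- ===== CLAIM (what is proved, stated in full; the proofs are below) =====
def Claim_equal_h3_pattern_database : Prop :=
  ∀ (state : List (List Int)), Dom_h3_pattern_database state →
    Pre_h3_pattern_database state → Spec_h3_pattern_database state (h3_pattern_database state)

-- ===== LEMMAS AND PROOFS =====

-- the four pattern goals, as in both ports
def pvGoals : PySem.Dict Int (Int × Int) :=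
  PySem.Dict.ofList [(1, (0, 0)), (2, (0, 1)), (3, (0, 2)), (4, (1, 0))]

-- A's contribution of one cell holding value v at (r, c)
def pvCell (v r c : Int) : Int :=
  match pvGoals.get? v with
  | some g => |g.1 - r| + |g.2 - c|
  | none => 0

-- B's second phase, as a function of the positions index
def pvTot (d : PySem.Dict Int (List (Int × Int))) : Int :=
  pvGoals.items.foldl (fun total kv =>
    (d.getD kv.1 []).foldl (fun total p =>
      total + (|kv.2.1 - p.1| + |kv.2.2 - p.2|)) total) 0

-- one step of B's index-building loop
def pvIns (d : PySem.Dict Int (List (Int × Int))) (v r c : Int) : PySem.Dict Int (List (Int × Int)) :=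
  d.insert v (d.getD v [] ++ [(r, c)])

theorem pvCell_step (acc v r c : Int) :
    (match (PySem.Dict.ofList [((1:Int), ((0:Int), (0:Int))), (2, (0, 1)), (3, (0, 2)), (4, (1, 0))]).get? v with
     | some g => acc + (|g.1 - r| + |g.2 - c|)
     | none => acc) = acc + pvCell v r c := by
  unfold pvCell pvGoals
  cases (PySem.Dict.ofList [((1:Int), ((0:Int), (0:Int))), (2, (0, 1)), (3, (0, 2)), (4, (1, 0))]).get? v with
  | none => simp
  | some g => rfl

theorem pvTot_pvIns (d : PySem.Dict Int (List (Int × Int))) (v r c : Int) :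
    pvTot (pvIns d v r c) = pvTot d + pvCell v r c := by
  have hg : pvGoals = ⟨[((1:Int), ((0:Int), (0:Int))), (2, (0, 1)), (3, (0, 2)), (4, (1, 0))]⟩ := by
    decide
  unfold pvTot pvCell pvIns
  rw [hg]
  simp only [PySem.Dict.getD_insert, PySem.List.foldl_add, PySem.Dict.get?_mk_cons,
    List.foldl_cons, List.foldl_nil]
  by_cases h1 : v = 1
  · subst h1; simp; ring
  by_cases h2 : v = 2
  · subst h2; simp; ring
  by_cases h3 : v = 3
  · subst h3; simp; ring
  by_cases h4 : v = 4
  · subst h4; simp; ring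
  simp [Ne.symm h1, Ne.symm h2, Ne.symm h3, Ne.symm h4, PySem.Dict.get?]

theorem pvTot_empty : pvTot PySem.Dict.empty = 0 := by decide

theorem pvGet0 {α : Type} (x y z : α) (t : List α) (d : α) :
    PySem.List.pyGetD (x::y::z::t) 0 d = x := by simp [pysem]
theorem pvGet1 {α : Type} (x y z : α) (t : List α) (d : α) :
    PySem.List.pyGetD (x::y::z::t) 1 d = y := by simp [pysem]
theorem pvGet2 {α : Type} (x y z : α) (t : List α) (d : α) :
    PySem.List.pyGetD (x::y::z::t) 2 d = z := by simp [pysem]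
-- ===== VERDICT (by name: the statement is the Claim_ definition above) =====
theorem h3_pattern_database_spec : Claim_equal_h3_pattern_database := by
  intro state _ hpre
  obtain ⟨hlen, hrows⟩ := hpre
  obtain ⟨r0, s1, rfl⟩ : ∃ x t, state = x :: t := by
    cases state with | nil => simp at hlen | cons x t => exact ⟨x, t, rfl⟩
  obtain ⟨r1, s2, rfl⟩ : ∃ x t, s1 = x :: t := by
    cases s1 with | nil => simp at hlen | cons x t => exact ⟨x, t, rfl⟩
  obtain ⟨r2, s3, rfl⟩ : ∃ x t, s2 = x :: t := by
    cases s2 with | nil => simp at hlen | cons x t => exact ⟨x, t, rfl⟩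
  have h0 : 3 ≤ r0.length := hrows r0 (by simp)
  have h1 : 3 ≤ r1.length := hrows r1 (by simp)
  have h2 : 3 ≤ r2.length := hrows r2 (by simp)
  obtain ⟨a0, a1, a2, t0, rfl⟩ : ∃ x y z t, r0 = x :: y :: z :: t := by
    match r0, h0 with | x :: y :: z :: t, _ => exact ⟨x, y, z, t, rfl⟩
  obtain ⟨b0, b1, b2, t1, rfl⟩ : ∃ x y z t, r1 = x :: y :: z :: t := by
    match r1, h1 with | x :: y :: z :: t, _ => exact ⟨x, y, z, t, rfl⟩
  obtain ⟨c0, c1, c2, t2, rfl⟩ : ∃ x y z t, r2 = x :: y :: z :: t := by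
    match r2, h2 with | x :: y :: z :: t, _ => exact ⟨x, y, z, t, rfl⟩
  show h3_pattern_database _ = h3_pattern_database_alt _
  have hr3 : PySem.List.pyRange 0 3 1 = [0, 1, 2] := by decide
  have hB : h3_pattern_database_alt ((a0::a1::a2::t0)::(b0::b1::b2::t1)::(c0::c1::c2::t2)::s3) =
      pvTot (pvIns (pvIns (pvIns (pvIns (pvIns (pvIns (pvIns (pvIns (pvIns PySem.Dict.empty
        a0 0 0) a1 0 1) a2 0 2) b0 1 0) b1 1 1) b2 1 2) c0 2 0) c1 2 1) c2 2 2) := by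
    simp only [h3_pattern_database_alt, hr3, List.foldl_cons, List.foldl_nil,
      pvGet0, pvGet1, pvGet2, pvTot, pvIns, pvGoals]
  rw [hB]
  simp only [pvTot_pvIns, pvTot_empty]
  simp only [h3_pattern_database, hr3, List.foldl_cons, List.foldl_nil, pvGet0, pvGet1, pvGet2]
  simp only [pvCell_step]
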